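-- pv_equiv track=rewrite | github.com/nedunurisaiamulya/python_exercise | conject-it.py | conject_it
-- ===== SOURCE A (Python) =====
-- def conject_it(n):
--     if n == 1:
--         return "YES"
--     elif n < 1:
--         return "NO"
--     elif (n%2 == 0):
--         return conject_it(n//2)
--     else:
--         return conject_it((3*n)+1)
-- ===== SOURCE B (Python) =====
-- def _collatz_step(m):
--     """One transition of the Collatz machine: either a final verdict string
--     or the next integer state."""
--     if m == 1:
--         return "YES"
--     if m < 1:
--         return "NO"
--     return m // 2 if m % 2 == 0 else 3 * m + 1
--
-- def conject_it(n):
--     state = n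
--     while not isinstance(state, str):
--         state = _collatz_step(state)
--     return state
-- ===== Notes on version B (the rewrite author's own statement) =====
-- stated objective: alternative
-- what changed: Recast the recursive descent as an explicit state machine: a pure one-step transition function returning either a verdict or the next integer, driven by a generic fixpoint loop with constant stack depth instead of one frame per Collatz step.
import Mathlib
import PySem

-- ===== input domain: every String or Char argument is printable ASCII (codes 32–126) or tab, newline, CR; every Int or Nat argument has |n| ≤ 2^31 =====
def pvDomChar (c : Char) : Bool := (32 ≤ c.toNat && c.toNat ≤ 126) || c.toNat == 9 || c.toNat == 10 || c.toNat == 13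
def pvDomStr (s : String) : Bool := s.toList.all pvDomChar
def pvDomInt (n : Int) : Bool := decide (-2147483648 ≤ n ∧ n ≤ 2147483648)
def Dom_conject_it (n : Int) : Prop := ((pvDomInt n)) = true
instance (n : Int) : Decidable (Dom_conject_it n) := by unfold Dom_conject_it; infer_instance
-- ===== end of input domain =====

-- B recasts A's recursive Collatz descent as a state machine (pure transition function + driver loop, constant stack); equal wherever A returns.


-- ===== PORT A =====
-- A's recursion, made total with a fuel guard (never exhausted on Dom: Collatz
-- trajectories of |n| ≤ 2^31 are far shorter than the fuel); "" is the out-of-fuel sentinel.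
def conjectItRec : Nat → Int → String
  | 0, _ => ""
  | fuel + 1, n =>
    if n == 1 then "YES"
    else if n < 1 then "NO"
    else if PySem.Int.mod n 2 == 0 then conjectItRec fuel (PySem.Int.floordiv n 2)
    else conjectItRec fuel (3 * n + 1)

def conject_it (n : Int) : String := conjectItRec 1000000 n

-- ===== PORT B =====
-- B's transition function: a verdict (Sum.inl) or the next state (Sum.inr).
def collatzStep (m : Int) : Sum String Int :=
  if m == 1 then Sum.inl "YES"
  else if m < 1 then Sum.inl "NO"
  else Sum.inr (if PySem.Int.mod m 2 == 0 then PySem.Int.floordiv m 2 else 3 * m + 1)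

-- B's driver loop: iterate the transition until a verdict appears (same fuel guard/sentinel).
def collatzDrive : Nat → Sum String Int → String
  | _, Sum.inl r => r
  | 0, Sum.inr _ => ""
  | fuel + 1, Sum.inr m => collatzDrive fuel (collatzStep m)

def conject_it_alt (n : Int) : String := collatzDrive 1000000 (Sum.inr n)

-- ===== PRECONDITION & SPEC =====
def Spec_conject_it (n : Int) (out : String) : Prop := out = conject_it_alt n
instance (n : Int) (out : String) : Decidable (Spec_conject_it n out) := by unfold Spec_conject_it; infer_instance

-- ===== CLAIM (what is proved, stated in full; the proofs are below) =====
def Claim_equal_conject_it : Prop := ∀ (n : Int), Dom_conject_it n → Spec_conject_it n (conject_it n)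

-- ===== LEMMAS AND PROOFS =====
theorem rec_eq_drive (fuel : Nat) : ∀ n : Int, conjectItRec fuel n = collatzDrive fuel (Sum.inr n) := by
  induction fuel with
  | zero => intro n; rfl
  | succ f ih =>
    intro n
    simp only [conjectItRec, collatzDrive, collatzStep]
    by_cases h1 : n = 1
    · simp [h1, collatzDrive]
    · by_cases h2 : n < 1
      · simp [h1, h2, collatzDrive]
      · simp [h1, h2, ih, apply_ite (fun m : Int => collatzDrive f (Sum.inr m))]

-- ===== VERDICT (by name: the statement is the Claim_ definition above) =====
theorem conject_it_spec : Claim_equal_conject_it := by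
  intro n _
  unfold Spec_conject_it conject_it conject_it_alt
  exact rec_eq_drive 1000000 n
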